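-- pv_equiv track=rewrite | github.com/sgherbst/msdsl | msdsl/expr/expr.py | case_table
-- ===== SOURCE A (Python) =====
-- from typing import List, Tuple
--
-- def case_table(values: List, default):
--     # set up the table
--     table_length = 1<<len(values)
--     table = [None for _ in range(table_length)]
--
--     # fill the table
--     for k, value in enumerate(values):
--         for idx in range(1<<(len(values)-k-1), 1<<(len(values)-k)):
--             table[idx] = value
--     table[0] = default
--
--     # return the table
--     return table
-- ===== SOURCE B (Python) =====
-- def case_table(values, default):
--     n = len(values)
--     return [default] + [values[n - idx.bit_length()] for idx in range(1, 1 << n)]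
-- ===== Notes on version B (the rewrite author's own statement) =====
-- stated objective: simpler
-- what changed: Replaces A's preallocated None table mutated by nested per-value range loops with a single flat comprehension that derives each entry directly from the highest set bit (bit_length) of its index.
import Mathlib
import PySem

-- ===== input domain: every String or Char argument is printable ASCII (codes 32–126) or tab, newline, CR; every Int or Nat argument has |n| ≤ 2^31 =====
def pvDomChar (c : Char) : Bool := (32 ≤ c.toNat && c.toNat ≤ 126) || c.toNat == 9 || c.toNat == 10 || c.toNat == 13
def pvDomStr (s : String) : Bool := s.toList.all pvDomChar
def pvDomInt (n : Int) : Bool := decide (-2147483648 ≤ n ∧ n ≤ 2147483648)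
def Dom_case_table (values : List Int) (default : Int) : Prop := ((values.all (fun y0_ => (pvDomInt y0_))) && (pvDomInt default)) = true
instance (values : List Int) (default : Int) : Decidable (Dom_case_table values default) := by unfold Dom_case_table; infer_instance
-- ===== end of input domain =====

-- B builds the table in one flat pass from the highest set bit of each index instead of
-- A's nested per-value range loops over a preallocated mutable table (objective: simpler).

-- ===== PORT A =====
-- inner loop 'for idx in range(lo, hi): table[idx] = value'; idx is always a valid
-- nonnegative index into table in A's use, so list assignment is List.set at idx.toNat
def pvFill (t : List (Option Int)) (lo hi : Int) (v : Int) : List (Option Int) :=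
  (PySem.List.pyRange lo hi 1).foldl (fun t idx => t.set idx.toNat (some v)) t

-- outer loop 'for k, value in enumerate(values): …'; the exponents len(values)-k-1 and
-- len(values)-k are nonnegative throughout A's loop, so 1<<e is (2:Int)^e.toNat exactly
def pvOuter (n : Nat) (pairs : List (Int × Int)) (t : List (Option Int)) : List (Option Int) :=
  pairs.foldl (fun t kv =>
    pvFill t ((2:Int) ^ (((n:Int) - kv.1 - 1).toNat)) ((2:Int) ^ (((n:Int) - kv.1).toNat)) kv.2) t

def case_table (values : List Int) (default : Int) : List Int :=
  let n := values.length
  let table : List (Option Int) := List.replicate (2 ^ n) none  -- [None for _ in range(1<<n)]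
  let table := pvOuter n (PySem.List.enumerate values 0) table
  let table := table.set 0 (some default)                       -- table[0] = default
  -- every slot has been filled, so the Python list holds only ints at this point
  table.map (fun o => o.getD 0)

-- ===== PORT B =====
def case_table_alt (values : List Int) (default : Int) : List Int :=
  let n := values.length
  -- int.bit_length() ported as Nat.size; values[n - bit_length(idx)] is always in range,
  -- so the pyGet? never yields none and the .getD 0 is inert
  default :: (PySem.List.pyRange 1 ((2:Int) ^ n) 1).map
    (fun idx => (PySem.List.pyGet? values ((n:Int) - (Nat.size idx.toNat : Nat))).getD 0)

-- ===== PRECONDITION & SPEC =====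
def Spec_case_table (values : List Int) (default : Int) (out : List Int) : Prop := out = case_table_alt values default
instance (values : List Int) (default : Int) (out : List Int) : Decidable (Spec_case_table values default out) := by unfold Spec_case_table; infer_instance

-- ===== CLAIM (what is proved, stated in full; the proofs are below) =====
def Claim_equal_case_table : Prop := ∀ (values : List Int) (default : Int), Dom_case_table values default → Spec_case_table values default (case_table values default)

-- ===== LEMMAS AND PROOFS =====

theorem pvFill_length (lo hi : Int) (v : Int) (t : List (Option Int)) :
    (pvFill t lo hi v).length = t.length := by
  unfold pvFill
  generalize PySem.List.pyRange lo hi 1 = l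
  induction l generalizing t with
  | nil => rfl
  | cons x xs ih => simpa [List.foldl_cons] using ih (t.set x.toNat (some v))

theorem pvFill_get (t : List (Option Int)) (lo hi : Int) (v : Int) (j : Nat)
    (h0 : 0 ≤ lo) (hhi : hi ≤ (t.length : Int)) :
    (pvFill t lo hi v)[j]? =
      if lo ≤ (j : Int) ∧ (j : Int) < hi then some (some v) else t[j]? := by
  generalize hm : (hi - lo).toNat = m
  induction m generalizing lo t with
  | zero =>
    have hle : hi ≤ lo := by omega
    unfold pvFill
    rw [PySem.List.pyRange_one_eq_nil hle]
    simp only [List.foldl_nil]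
    rw [if_neg (by omega)]
  | succ m ih =>
    have hlo : lo < hi := by omega
    unfold pvFill
    rw [PySem.List.pyRange_one_cons hlo]
    simp only [List.foldl_cons]
    have hlen : ((t.set lo.toNat (some v)).length : Int) = t.length := by
      simp [List.length_set]
    have hrec := ih (t.set lo.toNat (some v)) (lo + 1) (by omega) (by omega) (by omega)
    have hstep : (List.foldl (fun t idx => t.set idx.toNat (some v))
        (t.set lo.toNat (some v)) (PySem.List.pyRange (lo + 1) hi 1)) =
        pvFill (t.set lo.toNat (some v)) (lo + 1) hi v := rfl
    rw [hstep, hrec, List.getElem?_set]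
    have hjlen : (j : Int) < hi → j < t.length := by omega
    split_ifs <;> first | rfl | omega

theorem pvOuter_length (n : Nat) (ps : List (Int × Int)) (t : List (Option Int)) :
    (pvOuter n ps t).length = t.length := by
  unfold pvOuter
  induction ps generalizing t with
  | nil => rfl
  | cons p ps ih => simp only [List.foldl_cons]; rw [ih, pvFill_length]

theorem pvOuter_get (vs : List Int) (n k : Nat) (t : List (Option Int)) (j : Nat)
    (hkn : k + vs.length ≤ n) (ht : t.length = 2 ^ n) :
    (pvOuter n (PySem.List.enumerate vs (k : Int)) t)[j]? =
      if 2 ^ (n - k - vs.length) ≤ j ∧ j < 2 ^ (n - k) then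
        some (some (vs.getD (n - Nat.size j - k) 0))
      else t[j]? := by
  induction vs generalizing k t with
  | nil =>
    rw [PySem.List.enumerate_nil]
    unfold pvOuter
    simp only [List.foldl_nil, List.length_nil, Nat.sub_zero]
    rw [if_neg (by omega)]
  | cons v rest ih =>
    rw [PySem.List.enumerate_cons]
    unfold pvOuter
    simp only [List.length_cons] at hkn
    simp only [List.foldl_cons, List.length_cons]
    have e1 : (((n : Int)) - (k : Int) - 1).toNat = n - k - 1 := by omega
    have e2 : (((n : Int)) - (k : Int)).toNat = n - k := by omega
    have hcast : ((k : Int) + 1) = ((k + 1 : Nat) : Int) := by push_cast; ring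
    rw [e1, e2, hcast]
    set t' := pvFill t ((2 : Int) ^ (n - k - 1)) ((2 : Int) ^ (n - k)) v with ht'
    have ht'len : t'.length = 2 ^ n := by rw [ht', pvFill_length, ht]
    have hstep : (List.foldl (fun t kv =>
        pvFill t ((2:Int) ^ (((n:Int) - kv.1 - 1).toNat)) ((2:Int) ^ (((n:Int) - kv.1).toNat)) kv.2)
        t' (PySem.List.enumerate rest ((k + 1 : Nat) : Int))) =
        pvOuter n (PySem.List.enumerate rest ((k + 1 : Nat) : Int)) t' := rfl
    rw [hstep, ih (k + 1) t' (by omega) ht'len]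
    have ht'get : t'[j]? =
        if (2 : Int) ^ (n - k - 1) ≤ (j : Int) ∧ (j : Int) < (2 : Int) ^ (n - k) then
          some (some v) else t[j]? := by
      rw [ht']
      exact pvFill_get t _ _ v j (by positivity)
        (by rw [ht]; exact_mod_cast Nat.pow_le_pow_right (by norm_num) (by omega))
    have hp1 : ((2 : Int) ^ (n - k - 1)) = ((2 ^ (n - k - 1) : Nat) : Int) := by push_cast; ring
    have hp2 : ((2 : Int) ^ (n - k)) = ((2 ^ (n - k) : Nat) : Int) := by push_cast; ring
    rw [hp1, hp2] at ht'get
    have ee1 : n - (k + 1) = n - k - 1 := by omega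
    have ee2 : n - (k + 1) - rest.length = n - k - (rest.length + 1) := by omega
    rw [ee2, ee1]
    have hmono1 : (2 : Nat) ^ (n - k - 1) ≤ 2 ^ (n - k) :=
      Nat.pow_le_pow_right (by norm_num) (by omega)
    have hmono2 : (2 : Nat) ^ (n - k - (rest.length + 1)) ≤ 2 ^ (n - k - 1) :=
      Nat.pow_le_pow_right (by norm_num) (by omega)
    by_cases hb1 : 2 ^ (n - k - (rest.length + 1)) ≤ j ∧ j < 2 ^ (n - k - 1)
    · -- j lands in one of rest's ranges
      rw [if_pos hb1, if_pos ⟨hb1.1, by omega⟩]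
      have hsz : Nat.size j ≤ n - k - 1 := Nat.size_le.mpr hb1.2
      have hidx : n - Nat.size j - k = (n - Nat.size j - (k + 1)) + 1 := by omega
      rw [hidx, List.getD_cons_succ]
    · rw [if_neg hb1]
      by_cases hb2 : 2 ^ (n - k - 1) ≤ j ∧ j < 2 ^ (n - k)
      · -- j lands in v's range
        rw [ht'get, if_pos (by exact_mod_cast hb2)]
        have hszle : Nat.size j ≤ n - k := Nat.size_le.mpr hb2.2
        have hszgt : n - k - 1 < Nat.size j := Nat.lt_size.mpr hb2.1
        rw [if_pos ⟨by omega, hb2.2⟩]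
        have hidx : n - Nat.size j - k = 0 := by omega
        rw [hidx, List.getD_cons_zero]
      · -- j outside all ranges filled so far
        rw [ht'get, if_neg (fun hc => hb2 ⟨by exact_mod_cast hc.1, by exact_mod_cast hc.2⟩),
          if_neg (by
            intro hc
            rcases Nat.lt_or_ge j (2 ^ (n - k - 1)) with h | h
            · exact hb1 ⟨hc.1, h⟩
            · exact hb2 ⟨h, hc.2⟩)]
-- ===== VERDICT (by name: the statement is the Claim_ definition above) =====
theorem case_table_spec : Claim_equal_case_table := by
  intro values default _
  unfold Spec_case_table case_table case_table_alt
  simp only []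
  apply List.ext_getElem?
  intro j
  set n := values.length with hn
  have hzero : ((0 : Int)) = ((0 : Nat) : Int) := by norm_num
  have hpc : ((2 : Int) ^ n) = ((2 ^ n : Nat) : Int) := by push_cast; ring
  rw [List.getElem?_map, List.getElem?_set]
  rcases j with _ | jj
  · -- index 0: both tables hold the default
    rw [if_pos rfl, if_pos (by rw [pvOuter_length, List.length_replicate]; positivity)]
    simp
  · rw [if_neg (by omega), hzero,
      pvOuter_get values n 0 (List.replicate (2 ^ n) none) (jj + 1) (by omega) (by simp)]
    simp only [Nat.sub_zero, Nat.sub_self, pow_zero, ← hn]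
    rw [List.getElem?_cons_succ, List.getElem?_map, PySem.List.getElem?_pyRange_one]
    by_cases hj : jj + 1 < 2 ^ n
    · rw [if_pos ⟨by omega, hj⟩, if_pos (by omega)]
      have htn : ((1 : Int) + (jj : Nat)).toNat = jj + 1 := by omega
      have hs1 : 1 ≤ Nat.size (jj + 1) := Nat.lt_size.mpr (by simp)
      have hs2 : Nat.size (jj + 1) ≤ n := Nat.size_le.mpr hj
      have hnpos : 1 ≤ n := by
        by_contra h
        have : n = 0 := by omega
        rw [this] at hj; omega
      simp only [Option.map_some, htn]
      rw [PySem.List.pyGet?_of_nonneg values (by omega)]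
      have hti : ((n : Int) - (Nat.size (jj + 1) : Nat)).toNat = n - Nat.size (jj + 1) := by
        omega
      rw [hti, List.getD_eq_getElem?_getD]
      simp
    · rw [if_neg (by omega), if_neg (by omega), List.getElem?_replicate, if_neg hj]
      rfl
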